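-- pv_equiv track=rewrite | github.com/htyeh/Safevault | ENC_DEC.py | decipher_key
-- ===== SOURCE A (Python) =====
-- def sublist(list, n):
--     for i in range(0, len(list), n):
--         yield list[i:i+n]
--
-- def decipher(string, n):
--     alphabet = "abcdefghijklmnopqrstuvwxyzäöüßABCDEFGHIJKLMNOPQRSTUVWXYZÄÖÜ 1234567890!\"$%&'()*+,-./:;<=>?@[\]_"
--     res = ""
--     for ltr in string:
--         if ltr in alphabet:
--             decipher_index = alphabet.find(ltr)-n
--             if decipher_index < 0:
--                 res += alphabet[decipher_index+len(alphabet)]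
--             else:
--                 res += alphabet[decipher_index]
--         else:
--             res += ltr
--     return res
--
-- def decipher_key(string, key):
--     if len(string) <= len(key):
--         return "".join([deciphered for deciphered in map(decipher,string,key)])
--     else:
--         str_segs = sublist(string, len(key))
--         res = ""
--         for string in str_segs:
--             res += "".join([deciphered for deciphered in map(decipher,string,key)])
--         return res
-- ===== SOURCE B (Python) =====
-- _ALPHABET = "abcdefghijklmnopqrstuvwxyzäöüßABCDEFGHIJKLMNOPQRSTUVWXYZÄÖÜ 1234567890!\"$%&'()*+,-./:;<=>?@[\\]_"
-- _INDEX = {c: i for i, c in enumerate(_ALPHABET)}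
--
-- def decipher_key(string, key):
--     out = []
--     for i, ch in enumerate(string):
--         t = _INDEX.get(ch)
--         if t is None:
--             out.append(ch)
--         else:
--             out.append(_ALPHABET[(t - key[i % len(key)]) % len(_ALPHABET)])
--     return "".join(out)
-- ===== Notes on version B (the rewrite author's own statement) =====
-- stated objective: simpler
-- what changed: Replaces A's key-length chunking generator plus two-argument map/join (and its <0-only wrap branch with raw, possibly negative indexing) by a single flat pass over enumerate(string) with a char-to-index dict built once, the key indexed by i % len(key), and a full modulo into the alphabet.
import Mathlib
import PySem

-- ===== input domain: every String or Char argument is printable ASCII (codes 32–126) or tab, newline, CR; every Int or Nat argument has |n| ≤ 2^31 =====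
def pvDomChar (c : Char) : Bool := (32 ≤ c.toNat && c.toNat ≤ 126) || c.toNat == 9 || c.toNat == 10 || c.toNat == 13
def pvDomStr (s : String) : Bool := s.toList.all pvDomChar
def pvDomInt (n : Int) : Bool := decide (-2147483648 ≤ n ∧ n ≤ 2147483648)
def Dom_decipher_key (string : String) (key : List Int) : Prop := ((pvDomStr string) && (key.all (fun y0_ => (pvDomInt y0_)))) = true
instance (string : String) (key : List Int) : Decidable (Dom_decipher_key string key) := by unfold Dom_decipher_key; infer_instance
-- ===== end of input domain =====

-- B replaces A's key-length chunking + two-argument map/join with one flat pass over enumerate(string),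
-- a char→index dict built once, key indexed by i % len(key), and a full modulo instead of A's one-step wrap branch (objective: simpler).

-- ===== PORT A =====
def pvAlpha : List Char := "abcdefghijklmnopqrstuvwxyzäöüßABCDEFGHIJKLMNOPQRSTUVWXYZÄÖÜ 1234567890!\"$%&'()*+,-./:;<=>?@[\\]_".toList

-- A's helper `decipher`; Python strings carried as List Char; the two raw indexings are pyGetD
-- (exact under Pre_, which puts every reached index in range).
def decipherA (s : List Char) (n : Int) : List Char :=
  s.foldl (fun res ltr =>
    if PySem.Chars.isIn [ltr] pvAlpha then
      let decipher_index : Int := PySem.Chars.find pvAlpha [ltr] - n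
      if decipher_index < 0 then
        res ++ [PySem.List.pyGetD pvAlpha (decipher_index + PySem.List.len pvAlpha) 'a']
      else
        res ++ [PySem.List.pyGetD pvAlpha decipher_index 'a']
    else res ++ [ltr]) []

-- A's generator `sublist` (the n = 0 guard is totality only: Pre_ excludes that case)
def pySublist (l : List Char) (n : Nat) : List (List Char) :=
  if h : 0 < n ∧ l ≠ [] then l.take n :: pySublist (l.drop n) n else []
termination_by l.length
decreasing_by
  have := List.length_pos_of_ne_nil h.2
  simp only [List.length_drop]; omega

def decipher_key (string : String) (key : List Int) : String :=
  if string.toList.length ≤ key.length then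
    String.ofList (List.zipWith (fun c k => decipherA [c] k) string.toList key).flatten
  else
    String.ofList ((pySublist string.toList key.length).foldl
      (fun res seg => res ++ (List.zipWith (fun c k => decipherA [c] k) seg key).flatten) [])

-- ===== PORT B =====
def pvIndex : PySem.Dict Char Int :=
  PySem.Dict.ofList ((PySem.List.enumerate pvAlpha 0).map (fun p => (p.2, p.1)))

-- loop body of B (named so the proofs can speak about one step)
def bstep (key : List Int) (i : Int) (ch : Char) : List Char :=
  match PySem.Dict.get? pvIndex ch with
  | none => [ch]
  | some t => [PySem.List.pyGetD pvAlpha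
      (PySem.Int.mod (t - PySem.List.pyGetD key (PySem.Int.mod i (PySem.List.len key)) 0)
        (PySem.List.len pvAlpha)) 'a']

def decipher_key_alt (string : String) (key : List Int) : String :=
  String.ofList ((PySem.List.enumerate string.toList 0).foldl
    (fun out p => out ++ bstep key p.1 p.2) [])

-- ===== PRECONDITION & SPEC =====
-- the key value B reads at position i, and the shift-in-range test for one character
def pvKeyVal (key : List Int) (i : Int) : Int :=
  PySem.List.pyGetD key (PySem.Int.mod i (PySem.List.len key)) 0
def pvCondAt (key : List Int) (i : Int) (c : Char) : Bool :=
  !pvAlpha.contains c ||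
    (decide ((pvAlpha.idxOf c : Int) - 94 ≤ pvKeyVal key i) &&
     decide (pvKeyVal key i ≤ (pvAlpha.idxOf c : Int) + 190))

-- Pre_ excludes exactly the inputs where A raises: a nonempty string with an empty key (ValueError
-- from range step 0), and any alphabet character whose key shift moves its index more than one
-- alphabet-length below 0 or past the end (IndexError).  A returns on every input satisfying Pre_.
def Pre_decipher_key (string : String) (key : List Int) : Prop :=
  (key = [] → string.toList = []) ∧
  ∀ p ∈ PySem.List.enumerate string.toList 0, pvCondAt key p.1 p.2 = true
instance (string : String) (key : List Int) : Decidable (Pre_decipher_key string key) := by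
  unfold Pre_decipher_key; infer_instance

def pvWitness_decipher_key : String × List Int := ("Hello, World!", [1, 2, 3])

def Spec_decipher_key (string : String) (key : List Int) (out : String) : Prop :=
  out = decipher_key_alt string key
instance (string : String) (key : List Int) (out : String) : Decidable (Spec_decipher_key string key out) := by
  unfold Spec_decipher_key; infer_instance

-- ===== CLAIM (what is proved, stated in full; the proofs are below) =====
def Claim_equal_decipher_key : Prop := ∀ (string : String) (key : List Int), Dom_decipher_key string key → Pre_decipher_key string key → Spec_decipher_key string key (decipher_key string key)

-- ===== LEMMAS AND PROOFS =====

-- facts about the fixed alphabet and the dict built from it, checked by evaluation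
set_option maxRecDepth 40000 in
theorem pvFacts : ∀ n ∈ List.range 95,
    PySem.Chars.find pvAlpha [pvAlpha.getD n 'a'] = n ∧
    PySem.Dict.get? pvIndex (pvAlpha.getD n 'a') = some n := by decide

set_option maxRecDepth 40000 in
theorem pvKeys : PySem.Dict.keys pvIndex = pvAlpha := by decide

theorem pvLen : pvAlpha.length = 95 := by decide

-- reference list: B's loop body applied at positions i, i+1, …
def pvR (key : List Int) : List Char → Int → List Char
  | [], _ => []
  | c :: cs, i => bstep key i c ++ pvR key cs (i + 1)

theorem pvAltFold (key : List Int) : ∀ (l : List Char) (i : Int) (acc : List Char),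
    (PySem.List.enumerate l i).foldl (fun out p => out ++ bstep key p.1 p.2) acc
      = acc ++ pvR key l i := by
  intro l
  induction l with
  | nil => intro i acc; simp [PySem.List.enumerate_nil, pvR]
  | cons c cs ih =>
    intro i acc
    simp [PySem.List.enumerate_cons, pvR, ih, List.append_assoc]

theorem pvRAppend (key : List Int) (l1 l2 : List Char) (i : Int) :
    pvR key (l1 ++ l2) i = pvR key l1 i ++ pvR key l2 (i + l1.length) := by
  induction l1 generalizing i with
  | nil => simp [pvR]
  | cons c cs ih =>
    simp only [List.cons_append, pvR, ih, List.append_assoc, List.length_cons]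
    rw [show ((cs.length + 1 : Nat) : Int) = (cs.length : Int) + 1 by push_cast; ring,
        show i + ((cs.length : Int) + 1) = (i + 1) + cs.length by ring]

theorem pvIndexEq (d : Int) (h0 : -190 ≤ d) (h1 : d ≤ 94) :
    (if d < 0 then [PySem.List.pyGetD pvAlpha (d + 95) 'a'] else [PySem.List.pyGetD pvAlpha d 'a'])
      = [PySem.List.pyGetD pvAlpha (PySem.Int.mod d 95) 'a'] := by
  rw [PySem.Int.mod_eq_emod_of_pos (by norm_num : (0:Int) < 95)]
  by_cases hd : 0 ≤ d
  · rw [if_neg (by omega), show d % 95 = d from by omega]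
  · rw [if_pos (by omega)]
    by_cases hd2 : -95 ≤ d
    · rw [show d % 95 = d + 95 from by omega]
    · rw [show d % 95 = d + 190 from by omega,
          show d + 95 = -(((-(d + 95)).toNat : Nat) : Int) from by omega,
          PySem.List.pyGetD_neg_natCast pvAlpha ((-(d + 95)).toNat) 'a' (by omega)
            (by rw [pvLen]; omega),
          PySem.List.pyGetD_eq_getElem pvAlpha 'a' (by omega) (by rw [pvLen]; omega)]
      have hab : pvAlpha.length - (-(d + 95)).toNat = (d + 190).toNat := by rw [pvLen]; omega
      simp only [hab]

-- one character: A's decipher on a one-character string equals B's loop body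
theorem pvChar (c : Char) (k : Int)
    (hcond : pvAlpha.contains c = true →
      (pvAlpha.idxOf c : Int) - 94 ≤ k ∧ k ≤ (pvAlpha.idxOf c : Int) + 190) :
    decipherA [c] k =
      (match PySem.Dict.get? pvIndex c with
       | none => [c]
       | some t => [PySem.List.pyGetD pvAlpha
           (PySem.Int.mod (t - k) (PySem.List.len pvAlpha)) 'a']) := by
  by_cases hc : c ∈ pvAlpha
  · have hidx : pvAlpha.idxOf c < pvAlpha.length := List.idxOf_lt_length_of_mem hc
    have h95 : pvAlpha.idxOf c < 95 := pvLen ▸ hidx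
    have hget : pvAlpha.getD (pvAlpha.idxOf c) 'a' = c := by
      rw [List.getD_eq_getElem _ _ hidx]; exact List.getElem_idxOf hidx
    have hf := pvFacts (pvAlpha.idxOf c) (List.mem_range.mpr h95)
    rw [hget] at hf
    obtain ⟨hfind, hdict⟩ := hf
    obtain ⟨hb1, hb2⟩ := hcond (by simpa using hc)
    have hin : PySem.Chars.isIn [c] pvAlpha = true :=
      (PySem.Chars.isIn_iff_infix [c] pvAlpha).mpr ((List.singleton_infix_iff c pvAlpha).mpr hc)
    rw [hdict]
    simp only [decipherA, List.foldl, hin, if_true, hfind, List.nil_append,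
      PySem.List.len_eq, pvLen]
    exact pvIndexEq _ (by omega) (by omega)
  · have hin : PySem.Chars.isIn [c] pvAlpha = false :=
      (PySem.Chars.isIn_eq_false_iff [c] pvAlpha).mpr
        (fun h => hc ((List.singleton_infix_iff c pvAlpha).mp h))
    have hdict : PySem.Dict.get? pvIndex c = none := by
      rw [PySem.Dict.get?_eq_none_iff_not_mem_keys, pvKeys]; exact hc
    rw [hdict]
    simp only [decipherA, List.foldl, hin, Bool.false_eq_true, if_false, List.nil_append]

set_option maxRecDepth 40000 in
theorem pvChunk (key : List Int) (_hk : key ≠ []) : ∀ (seg : List Char) (i : Int) (r : Nat),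
    0 ≤ i → i.toNat % key.length = r → seg.length + r ≤ key.length →
    (∀ p ∈ PySem.List.enumerate seg i, pvCondAt key p.1 p.2 = true) →
    (List.zipWith (fun c k => decipherA [c] k) seg (key.drop r)).flatten = pvR key seg i := by
  intro seg
  induction seg with
  | nil => intro i r _ _ _ _; simp [pvR]
  | cons c cs ih =>
    intro i r h0 hr hlen hcond
    have hrm : r < key.length := by simp only [List.length_cons] at hlen; omega
    rw [← List.getElem_cons_drop hrm]
    simp only [List.zipWith_cons_cons, List.flatten_cons, pvR]
    have hkv : PySem.List.pyGetD key (PySem.Int.mod i (PySem.List.len key)) 0 = key[r] := by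
      rw [show i = ((i.toNat : Nat) : Int) from (Int.toNat_of_nonneg h0).symm]
      simp only [PySem.List.len_eq, PySem.Int.mod_natCast, PySem.List.pyGetD_natCast, hr]
      exact List.getD_eq_getElem _ _ hrm
    have hhead : pvCondAt key i c = true :=
      hcond (i, c) (by rw [PySem.List.enumerate_cons]; exact List.mem_cons_self)
    have hcc : pvAlpha.contains c = true →
        (pvAlpha.idxOf c : Int) - 94 ≤ key[r] ∧ key[r] ≤ (pvAlpha.idxOf c : Int) + 190 := by
      intro hcon
      rw [← hkv]
      unfold pvCondAt pvKeyVal at hhead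
      rw [hcon] at hhead
      simpa using hhead
    have hb : bstep key i c =
        (match PySem.Dict.get? pvIndex c with
         | none => [c]
         | some t => [PySem.List.pyGetD pvAlpha
             (PySem.Int.mod (t - key[r]) (PySem.List.len pvAlpha)) 'a']) := by
      unfold bstep
      rw [hkv]
    rw [pvChar c key[r] hcc, ← hb]
    congr 1
    rcases cs with _ | ⟨c2, cs2⟩
    · simp [pvR]
    · have hm2 : r + 1 < key.length := by simp only [List.length_cons] at hlen; omega
      apply ih (i + 1) (r + 1) (by omega) ?_ (by simp only [List.length_cons] at hlen ⊢; omega) ?_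
      · have h2 : (i + 1).toNat = i.toNat + 1 := by omega
        rw [h2, Nat.add_mod, hr, Nat.mod_eq_of_lt (show 1 < key.length by omega),
            Nat.mod_eq_of_lt (show r + 1 < key.length by omega)]
      · intro p hp
        exact hcond p (by rw [PySem.List.enumerate_cons]; exact List.mem_cons_of_mem _ hp)

theorem pvChunks (key : List Int) (hk : key ≠ []) : ∀ (N : Nat) (l : List Char) (i : Int) (acc : List Char),
    l.length ≤ N → 0 ≤ i → i.toNat % key.length = 0 →
    (∀ p ∈ PySem.List.enumerate l i, pvCondAt key p.1 p.2 = true) →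
    (pySublist l key.length).foldl
      (fun res seg => res ++ (List.zipWith (fun c k => decipherA [c] k) seg key).flatten) acc
      = acc ++ pvR key l i := by
  have hm : 0 < key.length := List.length_pos_of_ne_nil hk
  intro N
  induction N with
  | zero =>
    intro l i acc hN _ _ _
    have hl : l = [] := List.eq_nil_of_length_eq_zero (by omega)
    subst hl
    rw [pySublist]
    simp [pvR]
  | succ N ihN =>
    intro l i acc hN h0 hmod hcond
    rcases eq_or_ne l [] with hl | hl
    · subst hl; rw [pySublist]; simp [pvR]
    · have hsplit : PySem.List.enumerate l i
          = PySem.List.enumerate (l.take key.length) i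
            ++ PySem.List.enumerate (l.drop key.length) (i + (l.take key.length).length) := by
        conv_lhs => rw [← List.take_append_drop key.length l]
        rw [PySem.List.enumerate_append]
      rw [pySublist, dif_pos ⟨hm, hl⟩, List.foldl_cons]
      have htake : (List.zipWith (fun c k => decipherA [c] k) (l.take key.length) key).flatten
          = pvR key (l.take key.length) i := by
        have := pvChunk key hk (l.take key.length) i 0 h0 (by omega) ?_ ?_
        · simpa using this
        · simp only [List.length_take]; omega
        · intro p hp
          exact hcond p (by rw [hsplit]; exact List.mem_append_left _ hp)
      by_cases hlen : l.length ≤ key.length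
      · have hdrop : l.drop key.length = [] := List.drop_eq_nil_of_le hlen
        have htakeq : l.take key.length = l := List.take_of_length_le hlen
        rw [hdrop, show pySublist [] key.length = [] from by rw [pySublist]; simp,
            List.foldl_nil, htake, htakeq]
      · have hdlen : (l.drop key.length).length ≤ N := by
          simp only [List.length_drop]; omega
        have htl : (l.take key.length).length = key.length := by
          simp only [List.length_take]; omega
        rw [ihN (l.drop key.length) (i + key.length)
              (acc ++ (List.zipWith (fun c k => decipherA [c] k) (l.take key.length) key).flatten)
              hdlen (by omega) ?_ ?_]
        · rw [htake]
          conv_rhs => rw [← List.take_append_drop key.length l]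
          rw [pvRAppend, htl]
          simp only [List.append_assoc]
        · have h2 : (i + key.length).toNat = i.toNat + key.length := by omega
          rw [h2, Nat.add_mod_right, hmod]
        · intro p hp
          refine hcond p ?_
          rw [hsplit, htl]
          exact List.mem_append_right _ hp

-- ===== VERDICT (by name: the statement is the Claim_ definition above) =====
theorem decipher_key_spec : Claim_equal_decipher_key := by
  intro string key _hdom hpre
  unfold Pre_decipher_key at hpre
  obtain ⟨h1, h2⟩ := hpre
  unfold Spec_decipher_key decipher_key decipher_key_alt
  rw [pvAltFold key string.toList 0 []]
  simp only [List.nil_append]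
  rcases eq_or_ne key [] with hk | hk
  · have hs : string.toList = [] := h1 hk
    rw [hs]
    simp [pvR]
  · have hm : 0 < key.length := List.length_pos_of_ne_nil hk
    split_ifs with hlen
    · congr 1
      have := pvChunk key hk string.toList 0 0 le_rfl (by simp) (by omega) h2
      simpa using this
    · congr 1
      have := pvChunks key hk string.toList.length string.toList 0 [] le_rfl le_rfl (by simp) h2
      simpa using this
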